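-- pv_equiv track=rewrite | github.com/meld-project/SampleFarm | cfg/generate_embeddings.py | _handle_ptr
-- ===== SOURCE A (Python) =====
-- def _handle_ptr(ptr):
--     '''
--     [ebp-1Ch] [ebp+8+4] [esp+40h+-18h] [ebp+esp*4] [ebp+8]
--     '''
--
--     def _judge_num(string):
--         try:
--             if string.endswith('h'):
--                 tmp = int(string[:-1], 16)
--                 return True
--             else:
--                 return False
--         except:
--             return False
--
--     ptr = ptr.replace('+-', '-')
--
--     ret_ptr = '['
--     item = ''
--     count = 0
--     operator = ''
--
--     for char in ptr[1:]:
--         if char in ['+', '-', ']']: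
--             if not item.isnumeric() and not _judge_num(item):
--                 ret_ptr += operator + item
--             else:
--                 if item.isnumeric():
--                     value = int(item)
--                 else:
--                     value = int('0x'+item[:-1], 16)
--
--                 if operator == '+':
--                     count += value
--                 elif operator == '-':
--                     count -= value
--             operator = char if char != ']' else ''
--             item = ''
--         else:
--             item += char
--
--     if count <= -10:
--         ret_ptr += '-' + (hex(count)[3:]).upper() + 'h]'
--     elif -10 < count < 0:
--         ret_ptr += '-' + (hex(count)[3:]).upper() + ']'
--     elif count == 0:
--         ret_ptr += ']'
--     elif 0 < count < 10:
--         ret_ptr += '+' + (hex(count)[2:]).upper() + ']'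
--     elif count >= 10:
--         ret_ptr += '+' + (hex(count)[2:]).upper() + 'h]'
--
--     return ret_ptr
-- ===== SOURCE B (Python) =====
-- def _handle_ptr(ptr):
--     """Right-to-left single pass: each token is emitted when its *left* operator
--     is reached, symbolic pieces are collected back-to-front (joined once at the
--     end), numeric parts are summed order-independently, and the count is
--     formatted with one sign/magnitude/suffix composition."""
--
--     def _is_hex16(s):
--         try:
--             int(s, 16)
--             return True
--         except ValueError:
--             return False
--
--     def _emit(tok, op, count, syms):
--         if tok.isnumeric():
--             v = int(tok)
--         elif tok.endswith('h') and _is_hex16(tok[:-1]):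
--             v = int('0x' + tok[:-1], 16)
--         else:
--             syms.append(op + tok)
--             return count
--         if op == '+':
--             return count + v
--         if op == '-':
--             return count - v
--         return count
--
--     def _fmt(count):
--         if count == 0:
--             return ']'
--         sign = '-' if count < 0 else '+'
--         mag = format(abs(count), 'X')
--         return sign + mag + ('h]' if abs(count) >= 10 else ']')
--
--     body = ptr.replace('+-', '-')[1:]
--     count = 0
--     syms = []          # symbolic pieces, in right-to-left order
--     buf = []           # chars of the pending token, in right-to-left order
--     seen = False
--     for ch in reversed(body):
--         if ch in ('+', '-', ']'):
--             if seen: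
--                 count = _emit(''.join(reversed(buf)), '' if ch == ']' else ch, count, syms)
--             buf = []
--             seen = True
--         else:
--             buf.append(ch)
--     if seen:
--         count = _emit(''.join(reversed(buf)), '', count, syms)
--     return '[' + ''.join(reversed(syms)) + _fmt(count)
-- ===== Notes on version B (the rewrite author's own statement) =====
-- stated objective: alternative
-- what changed: B replaces A's left-to-right character machine (pending item flushed at each separator, symbolic text appended to a growing result string) by a single right-to-left pass that emits each token when its left operator is reached, builds the symbolic text back-to-front, sums the numeric contributions order-independently, and formats the final count with one sign/magnitude/suffix composition instead of A's five-branch hex-slicing ladder.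
import Mathlib
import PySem

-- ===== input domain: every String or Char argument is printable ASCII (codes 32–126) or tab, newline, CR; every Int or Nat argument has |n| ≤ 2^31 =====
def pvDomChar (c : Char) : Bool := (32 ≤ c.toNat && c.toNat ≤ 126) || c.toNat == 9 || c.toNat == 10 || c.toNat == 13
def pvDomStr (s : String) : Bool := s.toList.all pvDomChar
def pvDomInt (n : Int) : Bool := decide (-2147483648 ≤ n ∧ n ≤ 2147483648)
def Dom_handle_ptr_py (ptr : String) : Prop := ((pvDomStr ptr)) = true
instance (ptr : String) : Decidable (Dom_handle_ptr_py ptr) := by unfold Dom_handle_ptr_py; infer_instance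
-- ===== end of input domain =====

-- B is a single right-to-left pass emitting each token at its left operator, building the
-- symbolic text back-to-front and summing numerics order-independently (objective: alternative).
-- Shared low-level primitives (exact on the ASCII Dom):

-- str.isnumeric(item): on the ASCII domain isnumeric coincides with isdigit
def pvIsNum (l : List Char) : Bool := PySem.Chars.strIsdigit l

-- int(item) for an all-digit item (never raises there)
def pvDec (l : List Char) : Int := (PySem.Int.ofChars? l).getD 0

-- int(s, 16) succeeds?  (exact: PySem.Int.ofCharsBase?)
def pvValid16 (s : List Char) : Bool := (PySem.Int.ofCharsBase? s 16).isSome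

-- int('0x' + s, 16); 0 where Python raises (those inputs are excluded by Pre_)
def pvHex0x (s : List Char) : Int := (PySem.Int.ofCharsBase? ('0' :: 'x' :: s) 16).getD 0

-- one uppercase hex digit
def pvHexDigitU (d : Nat) : Char := if d < 10 then Char.ofNat (48 + d) else Char.ofNat (55 + d)

-- hex(n)[2:].upper() for n > 0 (= format(n, 'X'))
def pvToHexU (n : Nat) : List Char :=
  if _h : n < 16 then [pvHexDigitU n] else pvToHexU (n / 16) ++ [pvHexDigitU (n % 16)]
  decreasing_by exact Nat.div_lt_self (by omega) (by omega)

-- ===== PORT A =====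

-- A's inner helper _judge_num
def pvJudge (l : List Char) : Bool := PySem.Chars.endswith l ['h'] && pvValid16 l.dropLast

-- one iteration of A's character loop; state = (ret_ptr, item, count, operator)
def pvStepA (s : List Char × List Char × Int × List Char) (c : Char) :
    List Char × List Char × Int × List Char :=
  if c = '+' || c = '-' || c = ']' then
    let rc : List Char × Int :=
      if !pvIsNum s.2.1 && !pvJudge s.2.1 then (s.1 ++ s.2.2.2 ++ s.2.1, s.2.2.1)
      else
        let v : Int := if pvIsNum s.2.1 then pvDec s.2.1 else pvHex0x s.2.1.dropLast
        (s.1, if s.2.2.2 = ['+'] then s.2.2.1 + v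
              else if s.2.2.2 = ['-'] then s.2.2.1 - v else s.2.2.1)
    (rc.1, [], rc.2, if c = ']' then [] else [c])
  else (s.1, s.2.1 ++ [c], s.2.2.1, s.2.2.2)

-- A's final five-branch formatting ladder (hex(count)[3:]/[2:], uppercased)
def pvLadderA (cnt : Int) : List Char :=
  if cnt ≤ -10 then '-' :: (pvToHexU (-cnt).toNat ++ ['h', ']'])
  else if -10 < cnt ∧ cnt < 0 then '-' :: (pvToHexU (-cnt).toNat ++ [']'])
  else if cnt = 0 then [']']
  else if 0 < cnt ∧ cnt < 10 then '+' :: (pvToHexU cnt.toNat ++ [']'])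
  else '+' :: (pvToHexU cnt.toNat ++ ['h', ']'])

def handle_ptr_py (ptr : String) : String :=
  let body := (PySem.Chars.replace ptr.toList ['+', '-'] ['-']).drop 1   -- ptr.replace('+-','-')[1:]
  let s := body.foldl pvStepA (['['], [], 0, [])
  String.ofList (s.1 ++ pvLadderA s.2.2.1)

-- ===== PORT B =====

-- B's _emit: classify tok, add into count or append op+tok to the symbolic pieces
def pvEmitB (tok op : List Char) (cnt : Int) (syms : List (List Char)) :
    Int × List (List Char) :=
  let v : Option Int :=
    if pvIsNum tok then some (pvDec tok)
    else if PySem.Chars.endswith tok ['h'] && pvValid16 tok.dropLast then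
      some (pvHex0x tok.dropLast)
    else none
  match v with
  | none => (cnt, syms ++ [op ++ tok])
  | some v => (if op = ['+'] then cnt + v else if op = ['-'] then cnt - v else cnt, syms)

-- one iteration of B's reversed loop; state = (count, syms, buf, seen);
-- buf holds the pending token's chars right-to-left, ''.join(reversed(buf)) = buf.reverse
def pvStepB (s : Int × List (List Char) × List Char × Bool) (c : Char) :
    Int × List (List Char) × List Char × Bool :=
  if c = '+' || c = '-' || c = ']' then
    if s.2.2.2 then
      let r := pvEmitB s.2.2.1.reverse (if c = ']' then [] else [c]) s.1 s.2.1
      (r.1, r.2, [], true)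
    else (s.1, s.2.1, [], true)
  else (s.1, s.2.1, s.2.2.1 ++ [c], s.2.2.2)

-- B's _fmt: sign, magnitude, suffix
def pvFmtB (cnt : Int) : List Char :=
  if cnt = 0 then [']']
  else (if cnt < 0 then ['-'] else ['+']) ++ pvToHexU cnt.natAbs ++
       (if 10 ≤ cnt.natAbs then ['h', ']'] else [']'])

def handle_ptr_py_alt (ptr : String) : String :=
  let body := (PySem.Chars.replace ptr.toList ['+', '-'] ['-']).drop 1   -- ptr.replace('+-','-')[1:]
  let s := body.reverse.foldl pvStepB (0, [], [], false)                 -- for ch in reversed(body)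
  let r := if s.2.2.2 then pvEmitB s.2.2.1.reverse [] s.1 s.2.1 else (s.1, s.2.1)
  String.ofList ('[' :: (r.2.reverse.flatten ++ pvFmtB r.1))             -- ''.join(reversed(syms))

-- ===== PRECONDITION & SPEC =====

-- the segments of l between '+', '-', ']' separators (#separators + 1 segments)
def pvSegs : List Char → List (List Char)
  | [] => [[]]
  | c :: r =>
    if c = '+' || c = '-' || c = ']' then [] :: pvSegs r
    else
      match pvSegs r with
      | s :: ss => (c :: s) :: ss
      | [] => [[c]]

-- A raises ValueError exactly on inputs with a terminated token t ending in 'h' whose t[:-1]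
-- is a valid int(.,16) literal (sign/whitespace/underscores allowed) but is no longer valid
-- once A prepends '0x' to it; Pre_ excludes exactly those inputs.
def Pre_handle_ptr_py (ptr : String) : Prop :=
  ∀ t ∈ (pvSegs ((PySem.Chars.replace ptr.toList ['+', '-'] ['-']).drop 1)).dropLast,
    ¬(PySem.Chars.endswith t ['h'] = true ∧ pvValid16 t.dropLast = true ∧
      (PySem.Int.ofCharsBase? ('0' :: 'x' :: t.dropLast) 16).isSome = false)
instance (ptr : String) : Decidable (Pre_handle_ptr_py ptr) := by
  unfold Pre_handle_ptr_py; infer_instance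

def pvWitness_handle_ptr_py : String := "[esp+40h+-18h]"

def Spec_handle_ptr_py (ptr : String) (out : String) : Prop := out = handle_ptr_py_alt ptr
instance (ptr : String) (out : String) : Decidable (Spec_handle_ptr_py ptr out) := by
  unfold Spec_handle_ptr_py; infer_instance

-- ===== CLAIM (what is proved, stated in full; the proofs are below) =====
def Claim_equal_handle_ptr_py : Prop :=
  ∀ (ptr : String), Dom_handle_ptr_py ptr → Pre_handle_ptr_py ptr →
    Spec_handle_ptr_py ptr (handle_ptr_py ptr)

-- ===== LEMMAS AND PROOFS =====

-- the numeric value of a token, if it has one (A and B classify identically)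
def pvVal? (t : List Char) : Option Int :=
  if pvIsNum t then some (pvDec t)
  else if PySem.Chars.endswith t ['h'] && pvValid16 t.dropLast then some (pvHex0x t.dropLast)
  else none

-- count bookkeeping for an operator
def pvAdd (op : List Char) (c v : Int) : Int :=
  if op = ['+'] then c + v else if op = ['-'] then c - v else c

lemma pvEmitB_eq (t op : List Char) (cnt : Int) (syms : List (List Char)) :
    pvEmitB t op cnt syms =
      match pvVal? t with
      | none => (cnt, syms ++ [op ++ t])
      | some v => (pvAdd op cnt v, syms) := rfl

@[simp] lemma pvAdd_shift (op : List Char) (a b w : Int) :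
    pvAdd op a w + b = a + pvAdd op b w := by
  unfold pvAdd; split_ifs <;> ring

lemma pvStepA_sep {c : Char} (hc : (c = '+' || c = '-' || c = ']') = true)
    (ret item : List Char) (cnt : Int) (op : List Char) :
    pvStepA (ret, item, cnt, op) c =
      ((match pvVal? item with | none => ret ++ op ++ item | some _ => ret), [],
       (match pvVal? item with | none => cnt | some v => pvAdd op cnt v),
       if c = ']' then [] else [c]) := by
  unfold pvStepA pvVal? pvAdd pvJudge
  by_cases hn : pvIsNum item = true <;>
    by_cases hj : (PySem.Chars.endswith item ['h'] && pvValid16 item.dropLast) = true <;>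
    simp [hn, hj, hc]

-- A's ladder and B's _fmt format the same count identically
lemma pvLadder_eq_fmt (cnt : Int) : pvLadderA cnt = pvFmtB cnt := by
  by_cases hz : cnt = 0
  · simp [pvLadderA, pvFmtB, hz]
  by_cases hlt : cnt < 0
  · have e : (-cnt).toNat = cnt.natAbs := by omega
    by_cases hb : cnt ≤ -10
    · have h10 : 10 ≤ cnt.natAbs := by omega
      simp [pvLadderA, pvFmtB, hb, hlt, hz, e, h10]
    · have h2 : -10 < cnt ∧ cnt < 0 := by omega
      have h10 : ¬10 ≤ cnt.natAbs := by omega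
      simp [pvLadderA, pvFmtB, hb, hlt, hz, h2, e, h10]
  · have e : cnt.toNat = cnt.natAbs := by omega
    by_cases hsm : cnt < 10
    · have h4 : 0 < cnt ∧ cnt < 10 := by omega
      have h10 : ¬10 ≤ cnt.natAbs := by omega
      simp [pvLadderA, pvFmtB, show ¬cnt ≤ -10 by omega, hz, h4, e, h10, hlt]
    · have h10 : 10 ≤ cnt.natAbs := by omega
      simp [pvLadderA, pvFmtB, show ¬cnt ≤ -10 by omega, hz,
        show ¬(0 < cnt ∧ cnt < 10) by omega, e, h10, hlt]

-- while no separator has been seen, B's count and symbolic text stay at their initial values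
lemma pvSeenInv (m : List Char) :
    (m.foldl pvStepB (0, [], [], false)).2.2.2 = false →
    (m.foldl pvStepB (0, [], [], false)).1 = 0 ∧
    (m.foldl pvStepB (0, [], [], false)).2.1 = [] := by
  induction m using List.reverseRecOn with
  | nil => simp
  | append_singleton m c ih =>
    rw [List.foldl_append, List.foldl_cons, List.foldl_nil]
    generalize hS : List.foldl pvStepB (0, [], [], false) m = S at ih
    intro h
    by_cases hc : (c = '+' || c = '-' || c = ']') = true
    · by_cases hs : S.2.2.2 = true <;> simp [pvStepB, hc, hs] at h
    · simp only [pvStepB, hc, Bool.false_eq_true, if_false] at h ⊢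
      exact ih h

-- main invariant: A's left fold with pending state (ret, item, cnt, op) over l produces the
-- same final string as B's reversed fold over l, combined with the pending state
lemma pvMain (l : List Char) :
    ∀ (ret item : List Char) (cnt : Int) (op : List Char),
      (l.foldl pvStepA (ret, item, cnt, op)).1 ++
        pvLadderA (l.foldl pvStepA (ret, item, cnt, op)).2.2.1 =
      (if (l.reverse.foldl pvStepB (0, [], [], false)).2.2.2 then
        ret ++
          (pvEmitB (item ++ (l.reverse.foldl pvStepB (0, [], [], false)).2.2.1.reverse) op cnt []).2.reverse.flatten ++
          (l.reverse.foldl pvStepB (0, [], [], false)).2.1.reverse.flatten ++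
          pvFmtB ((pvEmitB (item ++ (l.reverse.foldl pvStepB (0, [], [], false)).2.2.1.reverse) op cnt []).1 +
            (l.reverse.foldl pvStepB (0, [], [], false)).1)
      else ret ++ pvFmtB cnt) := by
  induction l with
  | nil => intro ret item cnt op; simp [pvLadder_eq_fmt]
  | cons c l ih =>
    intro ret item cnt op
    rw [List.foldl_cons, List.reverse_cons, List.foldl_append]
    rw [List.foldl_cons, List.foldl_nil]
    by_cases hc : (c = '+' || c = '-' || c = ']') = true
    · -- separator: A flushes item with op; B's reversed fold sees c last
      have hinv := pvSeenInv l.reverse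
      rw [pvStepA_sep hc, ih]
      generalize hS : List.foldl pvStepB (0, [], [], false) l.reverse = S at hinv ⊢
      obtain ⟨bc, bp, bt, bs⟩ := S
      cases bs
      · obtain ⟨h1, h2⟩ := hinv rfl
        simp only at h1 h2
        subst h1; subst h2
        simp only [pvStepB, hc, if_true, Bool.false_eq_true, if_false, pvEmitB_eq]
        rcases hv : pvVal? item with _ | v <;> simp [hv]
      · simp only [pvStepB, hc, if_true, pvEmitB_eq]
        rcases hv : pvVal? item with _ | v <;> rcases hw : pvVal? bt.reverse with _ | w <;>
          simp [hv, hw, List.append_assoc]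
    · -- ordinary character: A extends item, B prepends to tok
      simp only [pvStepA, pvStepB, hc, Bool.false_eq_true, if_false]
      rw [ih]
      by_cases hs : (List.foldl pvStepB (0, [], [], false) l.reverse).2.2.2 = true <;>
        simp_all

theorem handle_ptr_py_spec : Claim_equal_handle_ptr_py := by
  intro ptr _ _
  unfold Spec_handle_ptr_py handle_ptr_py handle_ptr_py_alt
  simp only []
  generalize (PySem.Chars.replace ptr.toList ['+', '-'] ['-']).drop 1 = body
  have h := pvMain body ['['] [] 0 []
  have hinv := pvSeenInv body.reverse
  generalize hS : List.foldl pvStepB (0, [], [], false) body.reverse = S at h hinv ⊢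
  obtain ⟨bc, bp, bt, bs⟩ := S
  simp only [List.nil_append] at h
  rw [h]
  cases bs
  · obtain ⟨h1, h2⟩ := hinv rfl
    simp only at h1 h2
    subst h1; subst h2
    simp
  · simp only [if_true, pvEmitB_eq]
    rcases hv : pvVal? bt.reverse with _ | w <;> simp_all [pvAdd]
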